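-- pv_equiv track=rewrite | github.com/JesusLopez5599/Master | IPPPD/entregable-01-ipppd-25-26.py | alumnos_grupo
-- ===== SOURCE A (Python) =====
-- def alumnos_grupo (d):
--     grupos={}
--     for niño, grupo in d.items():
--         #si el grupo no está en el diccionario, lo creamos como lista vacía
--         if grupo not in grupos:
--             grupos[grupo] = []
--         #Agregamos el alumno a la lista correspondiente
--         grupos[grupo].append(niño)
--
--     for g in grupos:
--             grupos[g].sort(reverse=True)
--
--     grupos_ordenados = dict(sorted(grupos.items(), reverse=True))
--
--     return grupos_ordenados
-- ===== SOURCE B (Python) =====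
-- # B: one sort of the items by (grupo, niño) descending, then a single grouping
-- # pass with setdefault; no per-list sorts and no final dict sort (idiomatic).
-- def alumnos_grupo(d):
--     result = {}
--     for niño, grupo in sorted(d.items(), key=lambda it: (it[1], it[0]), reverse=True):
--         result.setdefault(grupo, []).append(niño)
--     return result
-- ===== Notes on version B (the rewrite author's own statement) =====
-- stated objective: idiomatic
-- what changed: A groups first and then sorts twice (each group's list in place, then the whole dict by key); B performs one sort of the items keyed by (grupo, niño) descending and builds the dict in a single setdefault pass, so both the key order and each list's order fall out of that one sort.
import Mathlib
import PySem

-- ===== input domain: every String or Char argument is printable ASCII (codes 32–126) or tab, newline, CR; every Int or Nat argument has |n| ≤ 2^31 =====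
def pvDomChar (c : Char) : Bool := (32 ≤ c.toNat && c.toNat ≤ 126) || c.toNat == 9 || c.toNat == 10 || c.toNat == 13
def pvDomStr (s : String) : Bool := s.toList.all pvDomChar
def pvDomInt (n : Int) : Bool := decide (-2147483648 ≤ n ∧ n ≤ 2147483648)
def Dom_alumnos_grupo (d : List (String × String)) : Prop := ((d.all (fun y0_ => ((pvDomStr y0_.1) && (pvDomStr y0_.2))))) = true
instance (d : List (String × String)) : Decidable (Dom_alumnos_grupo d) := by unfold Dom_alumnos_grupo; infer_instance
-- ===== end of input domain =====

-- B does one descending sort by (grupo, niño) and a single setdefault grouping pass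
-- instead of A's group-then-sort-each-list-then-sort-the-dict (idiomatic; same cost).

-- ===== PORT A =====
def alumnos_grupo (d : List (String × String)) : List (String × List String) :=
  -- first loop: if grupo not in grupos: grupos[grupo] = []; grupos[grupo].append(niño);
  -- second loop: each list sorted in place reverse=True (items order unchanged);
  -- finally dict(sorted(grupos.items(), reverse=True)) with tuple (= lexicographic) comparison
  (PySem.Dict.ofList (PySem.List.sorted2
      ((d.foldl (fun g p =>
          (if g.contains p.2 then g else g.insert p.2 ([] : List String)).modify p.2 []
            (fun l => l ++ [p.1])) PySem.Dict.empty).items.map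
        (fun kv => (kv.1, PySem.List.sorted kv.2 (fun x => x) true)))
      (fun kv => kv.1) (fun kv => kv.2) true)).items

-- ===== PORT B =====
def alumnos_grupo_alt (d : List (String × String)) : List (String × List String) :=
  ((PySem.List.sorted2 d (fun it => it.2) (fun it => it.1) true).foldl
    (fun g p => (g.setdefault p.2 ([] : List String)).modify p.2 [] (fun l => l ++ [p.1]))
    PySem.Dict.empty).items

-- ===== PRECONDITION & SPEC =====
-- Pre_ excludes association lists with a repeated niño key: a Python dict cannot
-- contain duplicate keys, so such lists do not represent any input of A.
def Pre_alumnos_grupo (d : List (String × String)) : Prop := (d.map (fun p => p.1)).Nodup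
instance (d : List (String × String)) : Decidable (Pre_alumnos_grupo d) := by unfold Pre_alumnos_grupo; infer_instance
def pvWitness_alumnos_grupo : (List (String × String)) := [("ana", "g2"), ("bob", "g1"), ("eva", "g2")]
def Spec_alumnos_grupo (d : List (String × String)) (out : List (String × List String)) : Prop := out = alumnos_grupo_alt d
instance (d : List (String × String)) (out : List (String × List String)) : Decidable (Spec_alumnos_grupo d out) := by unfold Spec_alumnos_grupo; infer_instance

-- ===== CLAIM (what is proved, stated in full; the proofs are below) =====
def Claim_equal_alumnos_grupo : Prop := ∀ (d : List (String × String)), Dom_alumnos_grupo d → Pre_alumnos_grupo d → Spec_alumnos_grupo d (alumnos_grupo d)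

-- ===== LEMMAS AND PROOFS =====

-- the common pure grouping fold both loops reduce to
def pvGFold (l : List (String × String)) : PySem.Dict String (List String) :=
  l.foldl (fun g p => g.modify p.2 [] (fun v => v ++ [p.1])) PySem.Dict.empty

-- "ensure key then modify" = "modify with default" (shared by A's if-not-in-insert and B's setdefault)
theorem pv_ensure_modify (g : PySem.Dict String (List String)) (k : String) (f : List String → List String) :
    (if g.contains k then g else PySem.Dict.mk (g.items ++ [(k, [])])).modify k [] f
      = g.modify k [] f := by
  by_cases h : g.contains k = true
  · rw [if_pos h]
  · rw [if_neg h]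
    rw [Bool.not_eq_true] at h
    have hcon : (g.items.any fun p => p.1 == k) = false := h
    have hall : ∀ p ∈ g.items, (p.1 == k) = false := by
      intro p hp
      have h' := List.any_eq_false.mp hcon p hp
      simpa using h'
    have hfind : List.find? (fun p => p.1 == k) g.items = none :=
      List.find?_eq_none.mpr (fun p hp => by simp [hall p hp])
    have hmap : ∀ (v : List String),
        List.map (fun p => if p.1 = k then (k, v) else p) g.items = g.items := by
      intro v
      have hm := List.map_congr_left (l := g.items)
        (f := fun p => if p.1 = k then (k, v) else p) (g := fun p => p)
        (fun p hp => by
          have hne := hall p hp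
          simp only [beq_eq_false_iff_ne, ne_eq] at hne
          simp [hne])
      simpa using hm
    simp [PySem.Dict.modify, PySem.Dict.insert, PySem.Dict.getD, PySem.Dict.get?,
      PySem.Dict.contains, List.find?_append, hfind, hcon, hmap, List.map_append]

theorem pv_foldA (d : List (String × String)) :
    d.foldl (fun g p =>
      (if g.contains p.2 then g else g.insert p.2 ([] : List String)).modify p.2 []
        (fun l => l ++ [p.1])) PySem.Dict.empty = pvGFold d := by
  unfold pvGFold
  refine PySem.List.foldl_congr_mem _ _ _ _ ?_
  intro g p _
  have he : (if g.contains p.2 then g else g.insert p.2 ([] : List String))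
      = (if g.contains p.2 then g else PySem.Dict.mk (g.items ++ [(p.2, [])])) := by
    by_cases h : g.contains p.2 = true <;> simp [h, PySem.Dict.insert]
  rw [he, pv_ensure_modify]

theorem pv_foldB (l : List (String × String)) :
    l.foldl (fun g p => (g.setdefault p.2 ([] : List String)).modify p.2 [] (fun v => v ++ [p.1]))
      PySem.Dict.empty = pvGFold l := by
  unfold pvGFold
  refine PySem.List.foldl_congr_mem _ _ _ _ ?_
  intro g p _
  have he : g.setdefault p.2 ([] : List String)
      = (if g.contains p.2 then g else PySem.Dict.mk (g.items ++ [(p.2, [])])) := by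
    unfold PySem.Dict.setdefault
    rfl
  rw [he, pv_ensure_modify]

theorem pv_keys_gfold (l : List (String × String)) :
    (pvGFold l).keys = PySem.Set.ofList (l.map (fun p => p.2)) := by
  unfold pvGFold
  rw [PySem.Dict.keys_foldl_modify_key l (fun p => p.2) ([] : List String)
    (fun _ p => fun v => v ++ [p.1]) PySem.Dict.empty]
  rfl

theorem pv_nodup_keys_gfold (l : List (String × String)) : (pvGFold l).keys.Nodup := by
  rw [pv_keys_gfold]
  exact PySem.Set.nodup_ofList _

theorem pv_getD_gfold (l : List (String × String)) (k : String) :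
    (pvGFold l).getD k [] = (l.filter (fun p => p.2 == k)).map (fun p => p.1) := by
  unfold pvGFold
  have hm : l.foldl (fun g p => g.modify p.2 [] (fun v => v ++ [p.1])) PySem.Dict.empty
      = (l.map (fun p => (p.2, p.1))).foldl (fun d q => d.modify q.1 [] (fun v => v ++ [q.2]))
          PySem.Dict.empty := by
    rw [List.foldl_map]
  rw [hm, PySem.Dict.getD_foldl_modify_append]
  simp [List.filter_map, List.map_map, Function.comp_def, PySem.Dict.getD, PySem.Dict.get?,
    PySem.Dict.empty]

-- sorted2 with a tuple key = sorted with the lexicographic key (same insertion fold, equal `before`)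
theorem pv_before_pairs (xa xb : String × String) :
    (decide (xb.2 < xa.2) || (!decide (xa.2 < xb.2) && decide (xb.1 < xa.1)))
      = decide (toLex (xb.2, xb.1) < toLex (xa.2, xa.1)) := by
  by_cases h1 : xb.2 < xa.2
  · simp [h1, Prod.Lex.lt_iff]
  · by_cases h2 : xa.2 < xb.2
    · simp [h1, h2, Prod.Lex.lt_iff, ne_of_gt h2]
    · have he : xb.2 = xa.2 := le_antisymm (not_lt.1 h2) (not_lt.1 h1)
      simp [he, Prod.Lex.lt_iff]

theorem pv_sorted2_pairs (xs : List (String × String)) :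
    PySem.List.sorted2 xs (fun it => it.2) (fun it => it.1) true
      = PySem.List.sorted xs (fun it => toLex (it.2, it.1)) true := by
  unfold PySem.List.sorted2 PySem.List.sorted
  refine congrArg (fun b => List.foldl (fun acc x => PySem.List.insertBy b x acc) [] xs) ?_
  funext a b
  simpa using pv_before_pairs a b

theorem pv_before_items (xa xb : String × List String) :
    (decide (xb.1 < xa.1) || (!decide (xa.1 < xb.1) && decide (xb.2 < xa.2)))
      = decide (toLex (xb.1, xb.2) < toLex (xa.1, xa.2)) := by
  by_cases h1 : xb.1 < xa.1
  · simp [h1, Prod.Lex.lt_iff]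
  · by_cases h2 : xa.1 < xb.1
    · simp [h1, h2, Prod.Lex.lt_iff, ne_of_gt h2]
    · have he : xb.1 = xa.1 := le_antisymm (not_lt.1 h2) (not_lt.1 h1)
      simp [he, Prod.Lex.lt_iff]

theorem pv_sorted2_items (xs : List (String × List String)) :
    PySem.List.sorted2 xs (fun kv => kv.1) (fun kv => kv.2) true
      = PySem.List.sorted xs (fun kv => toLex (kv.1, kv.2)) true := by
  unfold PySem.List.sorted2 PySem.List.sorted
  refine congrArg (fun b => List.foldl (fun acc x => PySem.List.insertBy b x acc) [] xs) ?_
  funext a b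
  simpa using pv_before_items a b

-- Set.ofList is a sublist of its input
theorem pv_add_aux {α : Type} [BEq α] :
    ∀ (xs s : List α), ∃ t, List.foldl PySem.Set.add s xs = s ++ t ∧ t.Sublist xs
  | [], s => ⟨[], by simp⟩
  | x :: xs, s => by
      obtain ⟨t, ht, hs⟩ := pv_add_aux xs (PySem.Set.add s x)
      by_cases h : PySem.Set.contains s x = true
      · refine ⟨t, ?_, hs.trans (List.sublist_cons_self x xs)⟩
        simp only [List.foldl_cons]
        rw [ht, show PySem.Set.add s x = s from by unfold PySem.Set.add; rw [if_pos h]]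
      · refine ⟨x :: t, ?_, List.Sublist.cons₂ x hs⟩
        simp only [List.foldl_cons]
        rw [ht, show PySem.Set.add s x = s ++ [x] from by unfold PySem.Set.add; rw [if_neg h]]
        simp

theorem pv_ofList_sublist {α : Type} [BEq α] (xs : List α) :
    (PySem.Set.ofList xs).Sublist xs := by
  obtain ⟨t, ht, hs⟩ := pv_add_aux xs ([] : List α)
  unfold PySem.Set.ofList PySem.Set.empty
  rw [ht]
  simpa using hs

-- ofList on items with distinct keys is the identity on items
theorem pv_items_ofList (l : List (String × List String)) (h : (l.map (fun p => p.1)).Nodup) :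
    (PySem.Dict.ofList l).items = l := by
  unfold PySem.Dict.ofList PySem.Dict.update
  rw [PySem.Dict.items_foldl_insert_fresh l (fun p => p.1) (fun p => p.2) PySem.Dict.empty
    (fun a _ => by simp [PySem.Dict.contains, PySem.Dict.empty]) h]
  simp [PySem.Dict.empty]

-- ===== VERDICT (by name: the statement is the Claim_ definition above) =====
theorem alumnos_grupo_spec : Claim_equal_alumnos_grupo := by
  unfold Claim_equal_alumnos_grupo
  intro d _hDom hPre
  unfold Spec_alumnos_grupo alumnos_grupo alumnos_grupo_alt
  rw [pv_foldA, pv_sorted2_pairs, pv_foldB, pv_sorted2_items]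
  set S := PySem.List.sorted d (fun it => toLex (it.2, it.1)) true with hS
  have hSperm : S.Perm d := by rw [hS]; exact PySem.List.sorted_perm d _ _
  have hpairS : S.Pairwise (fun p q => toLex (q.2, q.1) ≤ toLex (p.2, p.1)) := by
    rw [hS]; exact PySem.List.sorted_pairwise_rev d _
  have hnodupS1 : (S.map (fun p => p.1)).Nodup := ((hSperm.map _).nodup_iff).mpr hPre
  -- C1: within each group, B's order is exactly A's per-list descending sort
  have hC1 : ∀ k : String,
      (S.filter (fun p => p.2 == k)).map (fun p => p.1)
        = PySem.List.sorted ((d.filter (fun p => p.2 == k)).map (fun p => p.1))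
            (fun x => x) true := by
    intro k
    symm
    apply PySem.List.sorted_rev_eq_of_perm_of_pairwise_gt
    · exact (hSperm.filter _).map _
    · rw [List.pairwise_map]
      have hsub : (S.filter (fun p => p.2 == k)).Sublist S := List.filter_sublist
      have hle : (S.filter (fun p => p.2 == k)).Pairwise
          (fun p q => toLex (q.2, q.1) ≤ toLex (p.2, p.1)) :=
        List.Pairwise.sublist hsub hpairS
      have hne : (S.filter (fun p => p.2 == k)).Pairwise (fun p q => p.1 ≠ q.1) := by
        have hnd : ((S.filter (fun p => p.2 == k)).map (fun p => p.1)).Nodup :=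
          List.Nodup.sublist (hsub.map _) hnodupS1
        exact List.pairwise_map.mp hnd
      refine List.Pairwise.imp_of_mem ?_ (hle.and hne)
      intro a b ha hb hab
      obtain ⟨h1, h2⟩ := hab
      have hak : a.2 = k := by simpa using (List.mem_filter.mp ha).2
      have hbk : b.2 = k := by simpa using (List.mem_filter.mp hb).2
      rw [Prod.Lex.le_iff] at h1
      simp only [ofLex_toLex] at h1
      rcases h1 with h1 | h1
      · rw [hak, hbk] at h1; exact absurd h1 (lt_irrefl k)
      · exact lt_of_le_of_ne h1.2 (Ne.symm h2)
  -- keys facts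
  have hkeysPerm : (PySem.Set.ofList (S.map (fun p => p.2))).Perm
      (PySem.Set.ofList (d.map (fun p => p.2))) := by
    rw [List.perm_ext_iff_of_nodup (PySem.Set.nodup_ofList _) (PySem.Set.nodup_ofList _)]
    intro a
    simp only [PySem.Set.mem_ofList]
    exact (hSperm.map _).mem_iff
  have hkeysGT : (PySem.Set.ofList (S.map (fun p => p.2))).Pairwise (fun a b => b < a) := by
    have hge : (S.map (fun p => p.2)).Pairwise (fun a b => b ≤ a) := by
      rw [List.pairwise_map]
      refine hpairS.imp ?_
      intro a b h1
      rw [Prod.Lex.le_iff] at h1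
      simp only [ofLex_toLex] at h1
      rcases h1 with h1 | h1
      · exact le_of_lt h1
      · exact le_of_eq h1.1
    have hge' := List.Pairwise.sublist (pv_ofList_sublist (S.map (fun p => p.2))) hge
    have hnd : (PySem.Set.ofList (S.map (fun p => p.2))).Pairwise (fun a b => a ≠ b) :=
      PySem.Set.nodup_ofList _
    exact (hge'.and hnd).imp (fun h => lt_of_le_of_ne h.1 (Ne.symm h.2))
  -- items of the grouping folds, as maps over the key lists
  have hitemsS : (pvGFold S).items
      = (PySem.Set.ofList (S.map (fun p => p.2))).map
          (fun k => (k, (S.filter (fun p => p.2 == k)).map (fun p => p.1))) := by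
    rw [PySem.Dict.items_eq_map_keys _ (pv_nodup_keys_gfold S) [], pv_keys_gfold]
    exact List.map_congr_left (fun k _ => by rw [pv_getD_gfold])
  have hitemsD : (pvGFold d).items
      = (PySem.Set.ofList (d.map (fun p => p.2))).map
          (fun k => (k, (d.filter (fun p => p.2 == k)).map (fun p => p.1))) := by
    rw [PySem.Dict.items_eq_map_keys _ (pv_nodup_keys_gfold d) [], pv_keys_gfold]
    exact List.map_congr_left (fun k _ => by rw [pv_getD_gfold])
  -- both sides as maps of the same per-key function
  have hB : (pvGFold S).items
      = (PySem.Set.ofList (S.map (fun p => p.2))).map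
          (fun k => (k, PySem.List.sorted ((d.filter (fun p => p.2 == k)).map (fun p => p.1))
            (fun x => x) true)) := by
    rw [hitemsS]
    exact List.map_congr_left (fun k _ => by rw [hC1 k])
  have hIA : (pvGFold d).items.map (fun kv => (kv.1, PySem.List.sorted kv.2 (fun x => x) true))
      = (PySem.Set.ofList (d.map (fun p => p.2))).map
          (fun k => (k, PySem.List.sorted ((d.filter (fun p => p.2 == k)).map (fun p => p.1))
            (fun x => x) true)) := by
    rw [hitemsD, List.map_map]
    rfl
  -- the single final sort of A produces exactly B's insertion order
  have hsorted : PySem.List.sorted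
      ((pvGFold d).items.map (fun kv => (kv.1, PySem.List.sorted kv.2 (fun x => x) true)))
      (fun kv => toLex (kv.1, kv.2)) true = (pvGFold S).items := by
    apply PySem.List.sorted_rev_eq_of_perm_of_pairwise_gt
    · rw [hB, hIA]
      exact hkeysPerm.map _
    · rw [hB, List.pairwise_map]
      refine hkeysGT.imp ?_
      intro a b hlt
      rw [Prod.Lex.lt_iff]
      simp only [ofLex_toLex]
      exact Or.inl hlt
  rw [hsorted]
  apply pv_items_ofList
  have hnd := pv_nodup_keys_gfold S
  simpa [PySem.Dict.keys] using hnd
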